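-- pv_equiv track=rewrite | github.com/AlessandroAnnini/storm-radar | src/storm_radar/calculators.py | get_enhanced_eta
-- ===== SOURCE A (Python) =====
-- from typing import Dict, List, Tuple
--
-- def get_enhanced_eta(reasons: List[str], bora_detected: bool) -> str:
--     """Enhanced ETA calculation"""
--
--     if bora_detected:
--         return "15-45 minutes (BORA - IMMEDIATE DANGER)"
--
--     if any("LIGHTNING" in reason for reason in reasons):
--         return "30-60 minutes"
--
--     if any("MARINE" in reason for reason in reasons):
--         return "45-90 minutes"
--
--     if any("Gubbio" in reason or "Fabriano" in reason for reason in reasons):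
--         return "1-2 hours"
--
--     return "2-3 hours"
-- ===== SOURCE B (Python) =====
-- def get_enhanced_eta(reasons, bora_detected):
--     """Enhanced ETA calculation — single pass over reasons accumulating flags."""
--     if bora_detected:
--         return "15-45 minutes (BORA - IMMEDIATE DANGER)"
--     has_lightning = has_marine = has_loc = False
--     for reason in reasons:
--         if "LIGHTNING" in reason:
--             has_lightning = True
--         if "MARINE" in reason:
--             has_marine = True
--         if "Gubbio" in reason or "Fabriano" in reason:
--             has_loc = True
--     if has_lightning:
--         return "30-60 minutes"
--     if has_marine:
--         return "45-90 minutes"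
--     if has_loc:
--         return "1-2 hours"
--     return "2-3 hours"
-- ===== Notes on version B (the rewrite author's own statement) =====
-- stated objective: alternative
-- what changed: Replaced A's up to three separate any() scans of reasons with one loop that accumulates the lightning/marine/location flags, then picks the ETA by the same priority order.
import Mathlib
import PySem

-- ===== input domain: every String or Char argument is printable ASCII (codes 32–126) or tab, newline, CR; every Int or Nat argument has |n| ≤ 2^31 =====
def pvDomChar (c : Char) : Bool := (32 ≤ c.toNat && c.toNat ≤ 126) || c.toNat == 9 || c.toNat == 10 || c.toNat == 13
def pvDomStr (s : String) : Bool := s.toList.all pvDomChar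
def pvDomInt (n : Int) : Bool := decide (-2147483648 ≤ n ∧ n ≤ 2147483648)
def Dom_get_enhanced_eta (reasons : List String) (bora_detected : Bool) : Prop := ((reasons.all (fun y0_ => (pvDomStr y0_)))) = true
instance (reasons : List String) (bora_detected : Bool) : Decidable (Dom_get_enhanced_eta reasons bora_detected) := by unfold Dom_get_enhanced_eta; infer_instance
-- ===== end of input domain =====

-- B replaces A's repeated any() scans with one accumulating pass; same priority order (objective: alternative).
-- ===== PORT A =====
def get_enhanced_eta (reasons : List String) (bora_detected : Bool) : String :=
  if bora_detected then "15-45 minutes (BORA - IMMEDIATE DANGER)"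
  else if reasons.any (fun reason => PySem.Str.isIn "LIGHTNING" reason) then "30-60 minutes"
  else if reasons.any (fun reason => PySem.Str.isIn "MARINE" reason) then "45-90 minutes"
  else if reasons.any (fun reason => PySem.Str.isIn "Gubbio" reason || PySem.Str.isIn "Fabriano" reason) then "1-2 hours"
  else "2-3 hours"

-- ===== PORT B =====
-- one step of B's loop: update the three flags from one reason
def pvEtaStep (st : Bool × Bool × Bool) (reason : String) : Bool × Bool × Bool :=
  (if PySem.Str.isIn "LIGHTNING" reason then true else st.1,
   if PySem.Str.isIn "MARINE" reason then true else st.2.1,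
   if PySem.Str.isIn "Gubbio" reason || PySem.Str.isIn "Fabriano" reason then true else st.2.2)

def get_enhanced_eta_alt (reasons : List String) (bora_detected : Bool) : String :=
  if bora_detected then "15-45 minutes (BORA - IMMEDIATE DANGER)"
  else
    let st := reasons.foldl pvEtaStep (false, false, false)
    if st.1 then "30-60 minutes"
    else if st.2.1 then "45-90 minutes"
    else if st.2.2 then "1-2 hours"
    else "2-3 hours"

-- ===== PRECONDITION & SPEC =====
def Spec_get_enhanced_eta (reasons : List String) (bora_detected : Bool) (out : String) : Prop := out = get_enhanced_eta_alt reasons bora_detected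
instance (reasons : List String) (bora_detected : Bool) (out : String) : Decidable (Spec_get_enhanced_eta reasons bora_detected out) := by unfold Spec_get_enhanced_eta; infer_instance

-- ===== CLAIM (what is proved, stated in full; the proofs are below) =====
def Claim_equal_get_enhanced_eta : Prop := ∀ (reasons : List String) (bora_detected : Bool), Dom_get_enhanced_eta reasons bora_detected → Spec_get_enhanced_eta reasons bora_detected (get_enhanced_eta reasons bora_detected)

-- ===== LEMMAS AND PROOFS =====

-- ===== VERDICT (by name: the statement is the Claim_ definition above) =====
theorem pvEtaFold_eq (rs : List String) (a b c : Bool) :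
    rs.foldl pvEtaStep (a, b, c) =
      (a || rs.any (fun r => PySem.Str.isIn "LIGHTNING" r),
       b || rs.any (fun r => PySem.Str.isIn "MARINE" r),
       c || rs.any (fun r => PySem.Str.isIn "Gubbio" r || PySem.Str.isIn "Fabriano" r)) := by
  induction rs generalizing a b c with
  | nil => simp
  | cons r rs ih =>
    simp only [List.foldl_cons, List.any_cons, pvEtaStep, ih]
    split_ifs <;> simp_all

theorem get_enhanced_eta_spec : Claim_equal_get_enhanced_eta := by
  intro reasons bora_detected _
  show get_enhanced_eta reasons bora_detected = get_enhanced_eta_alt reasons bora_detected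
  unfold get_enhanced_eta get_enhanced_eta_alt
  cases bora_detected with
  | true => simp
  | false => simp [pvEtaFold_eq]
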